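-- pv_equiv track=rewrite | github.com/kh277/BOJ | 백준/Gold/7989. The Bridge/The Bridge.py | solve
-- ===== SOURCE A (Python) =====
-- def solve(N, W):
--     if N == 1:
--         return W[0]
--     elif N == 2:
--         return W[1]
--
--     DP = [0 for _ in range(N)]
--     DP[0] = W[0]
--     DP[1] = W[1]
--     DP[2] = W[0]+W[1]+W[2]
--
--     for i in range(3, N):
--         DP[i] = DP[i-2] + min(W[0] + 2*W[1] + W[i], 2*W[0] + W[i-1] + W[i])
--
--     return DP[N-1]
-- ===== SOURCE B (Python) =====
-- def solve(N, W):
--     # Stride-2 accumulator over the single parity chain ending at N-1;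
--     # no DP array is allocated.
--     if N == 1:
--         return W[0]
--     if N == 2:
--         return W[1]
--     if N % 2 == 1:
--         total = W[0] + W[1] + W[2]
--         i = 4
--     else:
--         total = W[1]
--         i = 3
--     while i < N:
--         total += min(W[0] + 2*W[1] + W[i], 2*W[0] + W[i-1] + W[i])
--         i += 2
--     return total
-- ===== Notes on version B (the rewrite author's own statement) =====
-- stated objective: alternative
-- what changed: B replaces A's full DP-array fill (DP[i] = DP[i-2] + step) with a stride-2 while-loop accumulator that walks only the parity chain ending at N-1, allocating no array and doing half the iterations.
import Mathlib
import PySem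

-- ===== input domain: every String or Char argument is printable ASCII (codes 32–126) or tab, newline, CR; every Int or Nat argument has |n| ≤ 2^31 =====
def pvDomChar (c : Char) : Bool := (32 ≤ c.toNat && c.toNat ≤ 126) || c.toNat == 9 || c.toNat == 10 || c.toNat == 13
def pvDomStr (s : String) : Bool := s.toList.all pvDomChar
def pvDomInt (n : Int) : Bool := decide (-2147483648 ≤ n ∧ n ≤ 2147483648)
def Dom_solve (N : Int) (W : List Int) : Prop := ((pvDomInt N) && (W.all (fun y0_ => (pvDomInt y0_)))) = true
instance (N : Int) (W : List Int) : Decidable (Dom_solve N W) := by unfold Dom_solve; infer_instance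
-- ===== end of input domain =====

-- B walks a stride-2 parity chain instead of filling A's DP array; return values agree on Pre_.

-- ===== PORT A =====
-- literal transliteration of A: fill DP[0..N-1] left to right, answer DP[N-1]
def solve (N : Int) (W : List Int) : Int :=
  if N = 1 then PySem.List.pyGetD W 0 0
  else if N = 2 then PySem.List.pyGetD W 1 0
  else
    let dp0 : List Int := (PySem.List.pyRange 0 N).map (fun _ => 0)
    let dp1 := PySem.List.pySetD dp0 0 (PySem.List.pyGetD W 0 0)
    let dp2 := PySem.List.pySetD dp1 1 (PySem.List.pyGetD W 1 0)
    let dp3 := PySem.List.pySetD dp2 2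
      (PySem.List.pyGetD W 0 0 + PySem.List.pyGetD W 1 0 + PySem.List.pyGetD W 2 0)
    let dpF := (PySem.List.pyRange 3 N).foldl (fun dp i =>
        PySem.List.pySetD dp i (PySem.List.pyGetD dp (i - 2) 0 +
          min (PySem.List.pyGetD W 0 0 + 2 * PySem.List.pyGetD W 1 0 + PySem.List.pyGetD W i 0)
              (2 * PySem.List.pyGetD W 0 0 + PySem.List.pyGetD W (i - 1) 0 + PySem.List.pyGetD W i 0)))
      dp3
    PySem.List.pyGetD dpF (N - 1) 0

-- ===== PORT B =====
-- the while loop of Source B: i strides by 2, total accumulates the chain step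
def solveLoop (W : List Int) (N : Int) (i : Int) (total : Int) : Int :=
  if i < N then
    solveLoop W N (i + 2) (total +
      min (PySem.List.pyGetD W 0 0 + 2 * PySem.List.pyGetD W 1 0 + PySem.List.pyGetD W i 0)
          (2 * PySem.List.pyGetD W 0 0 + PySem.List.pyGetD W (i - 1) 0 + PySem.List.pyGetD W i 0))
  else total
termination_by (N - i).toNat
decreasing_by omega

def solve_alt (N : Int) (W : List Int) : Int :=
  if N = 1 then PySem.List.pyGetD W 0 0
  else if N = 2 then PySem.List.pyGetD W 1 0
  else if N % 2 = 1 then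
    solveLoop W N 4 (PySem.List.pyGetD W 0 0 + PySem.List.pyGetD W 1 0 + PySem.List.pyGetD W 2 0)
  else
    solveLoop W N 3 (PySem.List.pyGetD W 1 0)

-- ===== PRECONDITION & SPEC =====
-- Pre_ = exactly the inputs where Python A returns (otherwise it raises IndexError on W or DP)
def Pre_solve (N : Int) (W : List Int) : Prop :=
  (N = 1 ∧ 1 ≤ (W.length : Int)) ∨ (N = 2 ∧ 2 ≤ (W.length : Int)) ∨ (3 ≤ N ∧ N ≤ (W.length : Int))
instance (N : Int) (W : List Int) : Decidable (Pre_solve N W) := by unfold Pre_solve; infer_instance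
def pvWitness_solve : Int × List Int := (5, [2, 3, 5, 7, 11])
def Spec_solve (N : Int) (W : List Int) (out : Int) : Prop := out = solve_alt N W
instance (N : Int) (W : List Int) (out : Int) : Decidable (Spec_solve N W out) := by unfold Spec_solve; infer_instance

-- ===== CLAIM (what is proved, stated in full; the proofs are below) =====
def Claim_equal_solve : Prop := ∀ (N : Int) (W : List Int), Dom_solve N W → Pre_solve N W → Spec_solve N W (solve N W)

-- ===== LEMMAS AND PROOFS =====

-- the chain step cost at index i
def mstep (W : List Int) (i : Int) : Int :=
  min (PySem.List.pyGetD W 0 0 + 2 * PySem.List.pyGetD W 1 0 + PySem.List.pyGetD W i 0)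
      (2 * PySem.List.pyGetD W 0 0 + PySem.List.pyGetD W (i - 1) 0 + PySem.List.pyGetD W i 0)

-- the mathematical recurrence both programs compute
def gchain (W : List Int) : Nat → Int
  | 0 => PySem.List.pyGetD W 0 0
  | 1 => PySem.List.pyGetD W 1 0
  | 2 => PySem.List.pyGetD W 0 0 + PySem.List.pyGetD W 1 0 + PySem.List.pyGetD W 2 0
  | n + 3 => gchain W (n + 1) + mstep W ((n : Int) + 3)

lemma gchain_rec (W : List Int) (i : Int) (h : 3 ≤ i) :
    gchain W i.toNat = gchain W (i - 2).toNat + mstep W i := by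
  obtain ⟨n, hn⟩ : ∃ n : Nat, i = (n : Int) + 3 := ⟨(i - 3).toNat, by omega⟩
  subst hn
  have h1 : ((n : Int) + 3).toNat = n + 3 := by omega
  have h2 : ((n : Int) + 3 - 2).toNat = n + 1 := by omega
  rw [h1, h2, gchain]

-- B side: the loop accumulates the chain
lemma solveLoop_eq (W : List Int) (N : Int) :
    ∀ (k : Nat) (i : Int), 3 ≤ i → N ≤ i + 2 * k → i + 2 * k < N + 2 →
      solveLoop W N i (gchain W (i - 2).toNat) = gchain W (i + 2 * k - 2).toNat := by
  intro k
  induction k with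
  | zero =>
    intro i hi h1 h2
    rw [solveLoop]
    simp only [show ¬ i < N by omega, if_false]
    congr 1; omega
  | succ k ih =>
    intro i hi h1 h2
    by_cases hlt : i < N
    · rw [solveLoop]
      simp only [hlt, if_true]
      have : gchain W (i - 2).toNat + mstep W i = gchain W ((i + 2) - 2).toNat := by
        rw [show ((i + 2 - 2 : Int)) = i by omega, gchain_rec W i hi]
      rw [show (gchain W (i - 2).toNat +
            min (PySem.List.pyGetD W 0 0 + 2 * PySem.List.pyGetD W 1 0 + PySem.List.pyGetD W i 0)
                (2 * PySem.List.pyGetD W 0 0 + PySem.List.pyGetD W (i - 1) 0 + PySem.List.pyGetD W i 0)) =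
            gchain W ((i + 2) - 2).toNat from this]
      rw [ih (i + 2) (by omega) (by omega) (by omega)]
      congr 1; omega
    · exfalso; omega

-- generic int-index form of pyGetD_pySetD_natCast
lemma pyGetD_pySetD_int {xs : List Int} {n m : Int} (v d : Int) (h0 : 0 ≤ n)
    (h : n < (xs.length : Int)) (hm : 0 ≤ m) :
    PySem.List.pyGetD (PySem.List.pySetD xs n v) m d = if m = n then v else PySem.List.pyGetD xs m d := by
  have hn : n = ((n.toNat : Nat) : Int) := by omega
  have hmm : m = ((m.toNat : Nat) : Int) := by omega
  rw [hn, hmm, PySem.List.pyGetD_pySetD_natCast xs n.toNat m.toNat v d (by omega)]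
  by_cases hc : m.toNat = n.toNat
  · simp only [hc, if_true]
  · rw [if_neg hc, if_neg (by omega)]

-- A side: invariant of the foldl over pyRange 3 (3+t)
lemma foldA_invariant (W : List Int) (N : Int) (hN : 3 ≤ N) (dp3 : List Int)
    (hlen : dp3.length = N.toNat)
    (hinit : ∀ j : Int, 0 ≤ j → j < 3 → PySem.List.pyGetD dp3 j 0 = gchain W j.toNat) :
    ∀ (t : Nat), 3 + (t : Int) ≤ N →
      ((PySem.List.pyRange 3 (3 + (t : Int))).foldl (fun dp i =>
        PySem.List.pySetD dp i (PySem.List.pyGetD dp (i - 2) 0 +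
          min (PySem.List.pyGetD W 0 0 + 2 * PySem.List.pyGetD W 1 0 + PySem.List.pyGetD W i 0)
              (2 * PySem.List.pyGetD W 0 0 + PySem.List.pyGetD W (i - 1) 0 + PySem.List.pyGetD W i 0))) dp3).length = N.toNat ∧
      ∀ j : Int, 0 ≤ j → j < 3 + (t : Int) →
        PySem.List.pyGetD ((PySem.List.pyRange 3 (3 + (t : Int))).foldl (fun dp i =>
          PySem.List.pySetD dp i (PySem.List.pyGetD dp (i - 2) 0 +
            min (PySem.List.pyGetD W 0 0 + 2 * PySem.List.pyGetD W 1 0 + PySem.List.pyGetD W i 0)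
                (2 * PySem.List.pyGetD W 0 0 + PySem.List.pyGetD W (i - 1) 0 + PySem.List.pyGetD W i 0))) dp3) j 0 = gchain W j.toNat := by
  intro t
  induction t with
  | zero =>
    intro _
    rw [show (3 + ((0:Nat):Int)) = 3 by norm_num, PySem.List.pyRange_one_eq_nil (by omega)]
    exact ⟨hlen, fun j h0 h3 => hinit j h0 (by omega)⟩
  | succ t ih =>
    intro hle
    have hle' : 3 + (t : Int) ≤ N := by push_cast at hle ⊢; omega
    obtain ⟨ihlen, ihget⟩ := ih hle'
    have hsplit : PySem.List.pyRange 3 (3 + ((t + 1 : Nat) : Int)) =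
        PySem.List.pyRange 3 (3 + (t : Int)) ++ [3 + (t : Int)] := by
      rw [show (3 + ((t + 1 : Nat) : Int)) = (3 + (t : Int)) + 1 by push_cast; ring]
      exact PySem.List.pyRange_one_succ_right (by omega)
    rw [hsplit, List.foldl_append]
    set L := (PySem.List.pyRange 3 (3 + (t : Int))).foldl (fun dp i =>
        PySem.List.pySetD dp i (PySem.List.pyGetD dp (i - 2) 0 +
          min (PySem.List.pyGetD W 0 0 + 2 * PySem.List.pyGetD W 1 0 + PySem.List.pyGetD W i 0)
              (2 * PySem.List.pyGetD W 0 0 + PySem.List.pyGetD W (i - 1) 0 + PySem.List.pyGetD W i 0))) dp3 with hL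
    simp only [List.foldl_cons, List.foldl_nil]
    have hval : PySem.List.pyGetD L (3 + (t : Int) - 2) 0 +
        min (PySem.List.pyGetD W 0 0 + 2 * PySem.List.pyGetD W 1 0 + PySem.List.pyGetD W (3 + (t : Int)) 0)
            (2 * PySem.List.pyGetD W 0 0 + PySem.List.pyGetD W (3 + (t : Int) - 1) 0 + PySem.List.pyGetD W (3 + (t : Int)) 0)
        = gchain W (3 + (t : Int)).toNat := by
      have h1 : PySem.List.pyGetD L (3 + (t : Int) - 2) 0 = gchain W (3 + (t : Int) - 2).toNat := by
        rw [ihget (3 + (t : Int) - 2) (by omega) (by omega)]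
      rw [h1, gchain_rec W (3 + (t : Int)) (by omega)]
      rfl
    constructor
    · rw [PySem.List.length_pySetD, ihlen]
    · intro j h0 hj
      rw [pyGetD_pySetD_int _ _ (by omega) (by rw [ihlen]; omega) h0]
      by_cases hc : j = 3 + (t : Int)
      · rw [if_pos hc, hval, hc]
      · rw [if_neg hc]
        exact ihget j h0 (by push_cast at hj; omega)

-- ===== VERDICT (by name: the statement is the Claim_ definition above) =====
theorem solve_spec : Claim_equal_solve := by
  intro N W _ hpre
  unfold Spec_solve solve solve_alt
  rcases hpre with ⟨h1, _⟩ | ⟨h2, _⟩ | ⟨h3, _⟩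
  · simp [h1]
  · simp [h2]
  · have hN1 : ¬ N = 1 := by omega
    have hN2 : ¬ N = 2 := by omega
    rw [if_neg hN1, if_neg hN2, if_neg hN1, if_neg hN2]
    -- dp3 and its properties
    set dp0 : List Int := (PySem.List.pyRange 0 N).map (fun _ => 0) with hdp0
    have hlen0 : (dp0.length : Int) = N := by
      rw [hdp0, List.length_map, PySem.List.length_pyRange_one]; omega
    set dp1 := PySem.List.pySetD dp0 0 (PySem.List.pyGetD W 0 0) with hdp1
    set dp2 := PySem.List.pySetD dp1 1 (PySem.List.pyGetD W 1 0) with hdp2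
    set dp3 := PySem.List.pySetD dp2 2
      (PySem.List.pyGetD W 0 0 + PySem.List.pyGetD W 1 0 + PySem.List.pyGetD W 2 0) with hdp3
    have hlen1 : (dp1.length : Int) = N := by rw [hdp1, PySem.List.length_pySetD]; exact hlen0
    have hlen2 : (dp2.length : Int) = N := by rw [hdp2, PySem.List.length_pySetD]; exact hlen1
    have hlen3 : dp3.length = N.toNat := by
      rw [hdp3, PySem.List.length_pySetD]; omega
    have hinit : ∀ j : Int, 0 ≤ j → j < 3 → PySem.List.pyGetD dp3 j 0 = gchain W j.toNat := by
      intro j h0 h3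
      rw [hdp3, pyGetD_pySetD_int _ _ (by omega) (by omega) h0]
      by_cases hc2 : j = 2
      · rw [if_pos hc2, hc2]; rfl
      · rw [if_neg hc2, hdp2, pyGetD_pySetD_int _ _ (by omega) (by omega) h0]
        by_cases hc1 : j = 1
        · rw [if_pos hc1, hc1]; rfl
        · rw [if_neg hc1, hdp1, pyGetD_pySetD_int _ _ (by omega) (by omega) h0]
          rw [if_pos (by omega : j = 0), show j = 0 by omega]; rfl
    obtain ⟨hflen, hfget⟩ := foldA_invariant W N h3 dp3 hlen3 hinit (N - 3).toNat (by omega)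
    have hNt : 3 + (((N - 3).toNat : Nat) : Int) = N := by omega
    rw [hNt] at hflen hfget
    have hA : PySem.List.pyGetD ((PySem.List.pyRange 3 N).foldl (fun dp i =>
        PySem.List.pySetD dp i (PySem.List.pyGetD dp (i - 2) 0 +
          min (PySem.List.pyGetD W 0 0 + 2 * PySem.List.pyGetD W 1 0 + PySem.List.pyGetD W i 0)
              (2 * PySem.List.pyGetD W 0 0 + PySem.List.pyGetD W (i - 1) 0 + PySem.List.pyGetD W i 0))) dp3) (N - 1) 0
        = gchain W (N - 1).toNat := hfget (N - 1) (by omega) (by omega)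
    rw [hA]
    -- B side
    by_cases hpar : N % 2 = 1
    · rw [if_pos hpar]
      have hb : PySem.List.pyGetD W 0 0 + PySem.List.pyGetD W 1 0 + PySem.List.pyGetD W 2 0
          = gchain W ((4 : Int) - 2).toNat := rfl
      rw [hb, solveLoop_eq W N ((N - 3) / 2).toNat 4 (by omega) (by omega) (by omega)]
      congr 1; omega
    · rw [if_neg hpar]
      have hb : PySem.List.pyGetD W 1 0 = gchain W ((3 : Int) - 2).toNat := rfl
      rw [hb, solveLoop_eq W N ((N - 2) / 2).toNat 3 (by omega) (by omega) (by omega)]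
      congr 1; omega
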